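-- pv_equiv track=rewrite | github.com/movslofith/sandpit | 7.26.5_exercises.py | sum_before_first_even
-- ===== SOURCE A (Python) =====
-- def sum_before_first_even(xs):
--     """ Returns sum of all elements in a list up to but not including the first even number
--     """
--     sum = 0
--
--     for x in xs:
--         if x % 2 != 0:
--             sum = sum + x
--         else:
--             break
--     return sum
-- ===== SOURCE B (Python) =====
-- def sum_before_first_even(xs):
--     idx = next((i for i, x in enumerate(xs) if x % 2 == 0), len(xs))
--     return sum(xs[:idx])
-- ===== Notes on version B (the rewrite author's own statement) =====
-- stated objective: idiomatic
-- what changed: Replaces the interleaved accumulate-and-break loop by a two-phase computation: find the index of the first even element, then sum the slice before it.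
import Mathlib
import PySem

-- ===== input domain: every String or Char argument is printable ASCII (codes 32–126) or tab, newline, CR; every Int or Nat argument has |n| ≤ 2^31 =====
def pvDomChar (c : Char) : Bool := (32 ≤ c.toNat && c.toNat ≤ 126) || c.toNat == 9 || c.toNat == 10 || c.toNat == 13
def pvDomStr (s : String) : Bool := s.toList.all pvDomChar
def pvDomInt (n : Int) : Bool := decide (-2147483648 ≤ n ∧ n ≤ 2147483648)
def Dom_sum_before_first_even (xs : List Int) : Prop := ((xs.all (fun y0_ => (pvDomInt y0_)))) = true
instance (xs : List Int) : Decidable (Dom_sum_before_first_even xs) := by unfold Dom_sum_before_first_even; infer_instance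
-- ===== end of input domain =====

-- B replaces A's accumulate-and-break loop by a two-phase form (find first-even index, sum the prefix); same cost, more idiomatic.
-- ===== PORT A =====
-- A: loop accumulating odd elements, break at first even.
def pvLoopA (sum : Int) : List Int → Int
  | [] => sum
  | x :: rest => if PySem.Int.mod x 2 ≠ 0 then pvLoopA (sum + x) rest else sum

def sum_before_first_even (xs : List Int) : Int := pvLoopA 0 xs

-- ===== PORT B =====
-- B: index of first even element (len xs if none), then sum of the slice before it.
def pvFirstEvenIdx : List Int → Nat
  | [] => 0
  | x :: rest => if PySem.Int.mod x 2 = 0 then 0 else pvFirstEvenIdx rest + 1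

def sum_before_first_even_alt (xs : List Int) : Int :=
  (xs.take (pvFirstEvenIdx xs)).sum

-- ===== PRECONDITION & SPEC =====
def Spec_sum_before_first_even (xs : List Int) (out : Int) : Prop := out = sum_before_first_even_alt xs
instance (xs : List Int) (out : Int) : Decidable (Spec_sum_before_first_even xs out) := by unfold Spec_sum_before_first_even; infer_instance

-- ===== CLAIM (what is proved, stated in full; the proofs are below) =====
def Claim_equal_sum_before_first_even : Prop := ∀ (xs : List Int), Dom_sum_before_first_even xs → Spec_sum_before_first_even xs (sum_before_first_even xs)

-- ===== LEMMAS AND PROOFS =====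

-- loop invariant: the accumulator adds to the sum of the kept prefix
theorem pvLoopA_eq (acc : Int) (xs : List Int) :
    pvLoopA acc xs = acc + (xs.take (pvFirstEvenIdx xs)).sum := by
  induction xs generalizing acc with
  | nil => simp [pvLoopA, pvFirstEvenIdx]
  | cons x rest ih =>
    simp only [pvLoopA, pvFirstEvenIdx]
    by_cases h : PySem.Int.mod x 2 = 0
    · rw [if_neg (not_not_intro h), if_pos h]
      simp
    · rw [if_pos h, if_neg h, List.take_succ_cons, List.sum_cons, ih]
      ring

-- ===== VERDICT (by name: the statement is the Claim_ definition above) =====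
theorem sum_before_first_even_spec : Claim_equal_sum_before_first_even := by
  intro xs _
  unfold Spec_sum_before_first_even sum_before_first_even sum_before_first_even_alt
  simpa using pvLoopA_eq 0 xs
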